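-- pv_equiv track=rewrite | github.com/Skyoxima/Python-Practice | System Processes Emulation/Banker's_algo_deadlock_prevention.py | calculate_available_inst_1
-- ===== SOURCE A (Python) =====
-- def calculate_available_inst_1(machine_instances, allocations):
--     sumof_allocations = []
--     col_sum = 0
--
--     for i in range(0, len(machine_instances)):
--         for j in range(0, len(allocations)):
--             col_sum += allocations[j][i]
--         sumof_allocations.append(col_sum)
--         col_sum = 0
--
--     return ([k - l for k, l in zip(machine_instances, sumof_allocations)])
-- ===== SOURCE B (Python) =====
-- def calculate_available_inst_1(machine_instances, allocations):
--     available = list(machine_instances)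
--     for row in allocations:
--         for i in range(len(available)):
--             available[i] -= row[i]
--     return available
-- ===== Notes on version B (the rewrite author's own statement) =====
-- stated objective: simpler
-- what changed: Replaces the column-major double loop that builds a per-column sum list and then zips it against the totals with a single row-major pass that subtracts each allocation row in place from a copy of the totals.
import Mathlib
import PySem

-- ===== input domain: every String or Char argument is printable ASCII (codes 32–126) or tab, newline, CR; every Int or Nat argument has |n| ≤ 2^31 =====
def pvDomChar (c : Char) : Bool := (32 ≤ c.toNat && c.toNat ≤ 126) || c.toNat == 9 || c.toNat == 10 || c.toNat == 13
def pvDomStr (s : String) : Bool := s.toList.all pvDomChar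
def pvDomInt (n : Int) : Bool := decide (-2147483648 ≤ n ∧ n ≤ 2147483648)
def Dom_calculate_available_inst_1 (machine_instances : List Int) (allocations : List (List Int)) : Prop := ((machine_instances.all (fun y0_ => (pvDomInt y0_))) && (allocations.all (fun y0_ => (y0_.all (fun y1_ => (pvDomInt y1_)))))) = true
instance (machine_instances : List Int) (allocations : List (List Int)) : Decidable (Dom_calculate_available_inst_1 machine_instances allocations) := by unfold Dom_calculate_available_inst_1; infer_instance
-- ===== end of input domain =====

-- B replaces A's column-major sum list + zip by a single row-major in-place subtraction pass (simpler decomposition, same cost; B copies the totals list, no argument is mutated).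

-- ===== PORT A =====
-- column-major: for each column i, sum allocations[j][i] over rows j, collect the sums, then zip-subtract
def calculate_available_inst_1 (machine_instances : List Int) (allocations : List (List Int)) : List Int :=
  let sumof_allocations :=
    (PySem.List.pyRange 0 (PySem.List.len machine_instances) 1).map (fun i =>
      (PySem.List.pyRange 0 (PySem.List.len allocations) 1).foldl
        (fun col_sum j => col_sum + PySem.List.pyGetD (PySem.List.pyGetD allocations j []) i 0) 0)
  List.zipWith (fun k l => k - l) machine_instances sumof_allocations

-- ===== PORT B =====
-- row-major: start from a copy of the totals and subtract each row in place
def calculate_available_inst_1_alt (machine_instances : List Int) (allocations : List (List Int)) : List Int :=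
  allocations.foldl (fun available row =>
    (PySem.List.pyRange 0 (PySem.List.len available) 1).foldl
      (fun av i => PySem.List.pySetD av i (PySem.List.pyGetD av i 0 - PySem.List.pyGetD row i 0)) available)
    machine_instances

-- ===== PRECONDITION & SPEC =====
-- Pre_ excludes exactly the ragged inputs on which A (and B) raise IndexError:
-- some allocation row shorter than machine_instances while machine_instances is nonempty.
def Pre_calculate_available_inst_1 (machine_instances : List Int) (allocations : List (List Int)) : Prop :=
  machine_instances = [] ∨ ∀ row ∈ allocations, machine_instances.length ≤ row.length
instance (machine_instances : List Int) (allocations : List (List Int)) : Decidable (Pre_calculate_available_inst_1 machine_instances allocations) := by unfold Pre_calculate_available_inst_1; infer_instance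

def pvWitness_calculate_available_inst_1 : List Int × List (List Int) := ([10, 5, 7], [[0, 1, 0], [2, 0, 0], [3, 0, 2]])

def Spec_calculate_available_inst_1 (machine_instances : List Int) (allocations : List (List Int)) (out : List Int) : Prop := out = calculate_available_inst_1_alt machine_instances allocations
instance (machine_instances : List Int) (allocations : List (List Int)) (out : List Int) : Decidable (Spec_calculate_available_inst_1 machine_instances allocations out) := by unfold Spec_calculate_available_inst_1; infer_instance

-- ===== CLAIM (what is proved, stated in full; the proofs are below) =====
def Claim_equal_calculate_available_inst_1 : Prop := ∀ (machine_instances : List Int) (allocations : List (List Int)), Dom_calculate_available_inst_1 machine_instances allocations → Pre_calculate_available_inst_1 machine_instances allocations → Spec_calculate_available_inst_1 machine_instances allocations (calculate_available_inst_1 machine_instances allocations)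

-- ===== LEMMAS AND PROOFS =====

-- folding (+ g x) over a list starting from c = c + sum of the mapped list
theorem pv_foldl_add_shift (g : List Int → Int) (l : List (List Int)) (c : Int) :
    l.foldl (fun s r => s + g r) c = c + (l.map g).sum := by
  induction l generalizing c with
  | nil => simp
  | cons r rest ih => simp [List.foldl_cons, ih (c + g r)]; ring

-- A's inner loop computes the i-th column sum
theorem pvA_inner (allocations : List (List Int)) (i : Int) :
    (PySem.List.pyRange 0 (PySem.List.len allocations) 1).foldl
        (fun col_sum j => col_sum + PySem.List.pyGetD (PySem.List.pyGetD allocations j []) i 0) 0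
      = (allocations.map (fun r => PySem.List.pyGetD r i 0)).sum := by
  rw [PySem.List.foldl_pyRange_zero_pyGetD allocations []
       (fun acc r => acc + PySem.List.pyGetD r i 0) 0]
  exact (pv_foldl_add_shift (fun r => PySem.List.pyGetD r i 0) allocations 0).trans (by simp)

-- B's inner loop, restated over Nat indices: fold over List.range of set
def pvStep (row : List Int) (av : List Int) (k : Nat) : List Int :=
  av.set k (av.getD k 0 - row.getD k 0)

theorem pvB_inner_range (avail row : List Int) :
    (PySem.List.pyRange 0 (PySem.List.len avail) 1).foldl
        (fun av i => PySem.List.pySetD av i (PySem.List.pyGetD av i 0 - PySem.List.pyGetD row i 0)) avail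
      = (List.range avail.length).foldl (pvStep row) avail := by
  rw [PySem.List.len_eq, PySem.List.pyRange_zero_nat, List.foldl_map]
  simp only [PySem.List.pySetD_natCast, PySem.List.pyGetD_natCast]
  rfl

theorem pvB_fold_char (row avail : List Int) (n : Nat) (hn : n ≤ avail.length) :
    ((List.range n).foldl (pvStep row) avail).length = avail.length ∧
    ∀ k : Nat, ((List.range n).foldl (pvStep row) avail).getD k 0
      = if k < n then avail.getD k 0 - row.getD k 0 else avail.getD k 0 := by
  induction n with
  | zero => simp
  | succ n ih =>
    obtain ⟨hl, hg⟩ := ih (Nat.le_of_succ_le hn)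
    rw [List.range_succ, List.foldl_append, List.foldl_cons, List.foldl_nil]
    refine ⟨by simp [pvStep, hl], ?_⟩
    intro k
    have hgk := hg k
    have hgn := hg n
    simp only [pvStep, List.getD]
    by_cases hk : k = n
    · subst hk
      rw [List.getElem?_set_self (by omega)]
      simp only [Nat.lt_irrefl, ite_false] at hgn
      simp only [List.getD] at hgn
      simp [hgn]
    · rw [List.getElem?_set_ne (by omega)]
      simp only [List.getD] at hgk
      rw [hgk]
      by_cases h1 : k < n
      · simp [h1, Nat.lt_succ_of_lt h1]
      · have : ¬ k < n + 1 := by omega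
        simp [h1, this]

theorem pvB_inner (avail row : List Int) (h : avail.length ≤ row.length) :
    (List.range avail.length).foldl (pvStep row) avail = List.zipWith (fun a b => a - b) avail row := by
  obtain ⟨hl, hg⟩ := pvB_fold_char row avail avail.length le_rfl
  apply List.ext_getElem
  · simp [hl, Nat.min_eq_left h]
  · intro k hk1 hk2
    have := hg k
    simp only [List.getD] at this
    rw [List.getElem_zipWith]
    have hk : k < avail.length := by simpa [hl] using hk1
    rw [← List.getD_eq_getElem _ 0 hk1, List.getD, this]
    simp [hk, Nat.lt_of_lt_of_le hk h]

-- main equality for nonempty-compatible inputs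
theorem pv_main (allocations : List (List Int)) :
    ∀ machine_instances : List Int,
      (∀ row ∈ allocations, machine_instances.length ≤ row.length) →
      List.zipWith (fun k l => k - l) machine_instances
          ((PySem.List.pyRange 0 (PySem.List.len machine_instances) 1).map (fun i =>
            (allocations.map (fun r => PySem.List.pyGetD r i 0)).sum))
        = calculate_available_inst_1_alt machine_instances allocations := by
  induction allocations with
  | nil =>
    intro m _
    unfold calculate_available_inst_1_alt
    simp only [List.foldl_nil, List.map_nil, List.sum_nil]
    apply List.ext_getElem
    · simp
    · intro k hk1 hk2
      simp [List.getElem_zipWith]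
  | cons r rest ih =>
    intro m hrows
    have hr : m.length ≤ r.length := hrows r (by simp)
    have hrest : ∀ row ∈ rest, m.length ≤ row.length := fun row hm => hrows row (by simp [hm])
    unfold calculate_available_inst_1_alt
    rw [List.foldl_cons, pvB_inner_range, pvB_inner m r hr]
    have hzl : (List.zipWith (fun a b => a - b) m r).length = m.length := by
      simp [Nat.min_eq_left hr]
    have hrest' : ∀ row ∈ rest, (List.zipWith (fun a b => a - b) m r).length ≤ row.length := by
      intro row hm; rw [hzl]; exact hrest row hm
    have := ih (List.zipWith (fun a b => a - b) m r) hrest'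
    unfold calculate_available_inst_1_alt at this
    rw [← this]
    apply List.ext_getElem
    · simp [hzl]
    · intro k hk1 hk2
      have hkm : k < m.length := by
        simp only [List.length_zipWith, List.length_map, PySem.List.length_pyRange_one] at hk1
        omega
      have hkr : k < r.length := Nat.lt_of_lt_of_le hkm hr
      rw [List.getElem_zipWith, List.getElem_zipWith]
      rw [List.getElem_map, List.getElem_map, List.getElem_zipWith]
      rw [PySem.List.getElem_pyRange_one, PySem.List.getElem_pyRange_one]
      simp only [List.map_cons, List.sum_cons, zero_add]
      have hrk : PySem.List.pyGetD r ((k : Nat) : Int) 0 = r[k] := by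
        rw [PySem.List.pyGetD_natCast, List.getD_eq_getElem _ 0 hkr]
      rw [hrk]
      ring

-- B returns [] on empty totals
theorem pvB_nil (allocations : List (List Int)) :
    calculate_available_inst_1_alt [] allocations = [] := by
  unfold calculate_available_inst_1_alt
  induction allocations with
  | nil => rfl
  | cons r rest ih => simpa [PySem.List.pyRange] using ih

-- ===== VERDICT (by name: the statement is the Claim_ definition above) =====
theorem calculate_available_inst_1_spec : Claim_equal_calculate_available_inst_1 := by
  intro m al _ hpre
  unfold Spec_calculate_available_inst_1 calculate_available_inst_1
  rcases hpre with h | h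
  · subst h; simp [pvB_nil]
  · simp only []
    have := pv_main al m h
    rw [← this]
    congr 1
    apply List.map_congr_left
    intro i _
    exact pvA_inner al i
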